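-- pv_equiv track=rewrite | github.com/linfeng-du/PURPLE | src/lamp/retrievers/rank_gpt.py | _parse_completion
-- ===== SOURCE A (Python) =====
-- def _parse_completion(completion: str, num_passages: int) -> list[int]:
--     digits = "".join(char if char.isdigit() else " " for char in completion)
--     indices = list(
--         dict.fromkeys([int(char) - 1 for char in digits.strip().split()])
--     )
--
--     ordering = [i for i in indices if i in range(num_passages)]
--     ordering += [i for i in range(num_passages) if i not in indices]
--     return ordering
-- ===== SOURCE B (Python) =====
-- def _parse_completion(completion: str, num_passages: int) -> list[int]:
--     # Single pass over the characters: collect maximal digit runs, flush each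
--     # run as it ends, dedup with a seen-set and keep in-range indices in
--     # first-seen order; then append the never-mentioned passages.
--     ordering = []
--     seen = set()
--     token = ""
--     for ch in completion + "\n":
--         if ch.isdigit():
--             token += ch
--         elif token:
--             idx = int(token) - 1
--             token = ""
--             if idx not in seen:
--                 seen.add(idx)
--                 if 0 <= idx < num_passages:
--                     ordering.append(idx)
--     ordering.extend(i for i in range(num_passages) if i not in seen)
--     return ordering
-- ===== Notes on version B (the rewrite author's own statement) =====
-- stated objective: alternative
-- what changed: A's staged pipeline (join a digit-masked copy, strip, split, int-map, dict.fromkeys dedup, then two filter passes over the dedup list) is replaced by one pass over the characters with a token buffer, a seen-set and the in-range ordering appended at each token flush, followed only by the missing-passages pass.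
import Mathlib
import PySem

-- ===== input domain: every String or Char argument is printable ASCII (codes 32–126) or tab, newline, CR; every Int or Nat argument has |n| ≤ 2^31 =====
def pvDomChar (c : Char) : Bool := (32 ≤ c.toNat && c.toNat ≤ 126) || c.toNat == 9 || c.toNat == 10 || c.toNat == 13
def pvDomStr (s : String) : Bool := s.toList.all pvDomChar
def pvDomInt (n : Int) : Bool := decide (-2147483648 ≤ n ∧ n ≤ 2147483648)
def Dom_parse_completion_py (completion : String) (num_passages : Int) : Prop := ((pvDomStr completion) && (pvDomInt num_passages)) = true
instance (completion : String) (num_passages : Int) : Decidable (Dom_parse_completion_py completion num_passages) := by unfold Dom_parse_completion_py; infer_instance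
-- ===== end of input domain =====

-- B replaces A's staged join/strip/split/dedup pipeline by a single pass over the
-- characters with a token buffer, a seen-set and the in-range ordering built on
-- the fly (objective: alternative).

-- ===== PORT A =====
def parse_completion_py (completion : String) (num_passages : Int) : List Int :=
  -- digits = "".join(char if char.isdigit() else " " for char in completion)
  let digits := String.ofList (completion.toList.map (fun c => if PySem.Chars.isdigit c then c else ' '))
  -- tokens of digits.strip().split() are nonempty all-digit strings, so int() always
  -- succeeds; the `.getD 0` default is never taken
  let indices := PySem.List.dedup
    ((PySem.Str.split₀ (PySem.Str.strip digits)).map (fun t => (PySem.Int.ofStr? t).getD 0 - 1))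
  -- ordering = [i for i in indices if i in range(num_passages)]
  let ordering := indices.filter (fun i => (PySem.List.pyRange 0 num_passages 1).contains i)
  -- ordering += [i for i in range(num_passages) if i not in indices]
  ordering ++ (PySem.List.pyRange 0 num_passages 1).filter (fun i => !(indices.contains i))

-- ===== PORT B =====
-- loop body of B's single for-loop; state = (token, seen, ordering)
def pcStep (num_passages : Int) (st : List Char × PySem.Set Int × List Int) (ch : Char) :
    List Char × PySem.Set Int × List Int :=
  if PySem.Chars.isdigit ch then (st.1 ++ [ch], st.2)
  else if st.1.isEmpty then st
  else
    -- idx = int(token) - 1  (token is a nonempty digit run, int() succeeds)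
    let idx := (PySem.Int.ofStr? (String.ofList st.1)).getD 0 - 1
    ([], if st.2.1.contains idx then st.2
         else (st.2.1.add idx,
               if 0 ≤ idx ∧ idx < num_passages then st.2.2 ++ [idx] else st.2.2))

def parse_completion_py_alt (completion : String) (num_passages : Int) : List Int :=
  -- for ch in completion + "\n": …
  let fin := (completion.toList ++ ['\n']).foldl (pcStep num_passages) ([], PySem.Set.empty, [])
  -- ordering.extend(i for i in range(num_passages) if i not in seen)
  fin.2.2 ++ (PySem.List.pyRange 0 num_passages 1).filter (fun i => !(fin.2.1.contains i))

-- ===== PRECONDITION & SPEC =====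
def Spec_parse_completion_py (completion : String) (num_passages : Int) (out : List Int) : Prop := out = parse_completion_py_alt completion num_passages
instance (completion : String) (num_passages : Int) (out : List Int) : Decidable (Spec_parse_completion_py completion num_passages out) := by unfold Spec_parse_completion_py; infer_instance

-- ===== CLAIM (what is proved, stated in full; the proofs are below) =====
def Claim_equal_parse_completion_py : Prop := ∀ (completion : String) (num_passages : Int), Dom_parse_completion_py completion num_passages → Spec_parse_completion_py completion num_passages (parse_completion_py completion num_passages)

-- ===== LEMMAS AND PROOFS =====

-- the character substitution of A's first line
def pcSub (c : Char) : Char := if PySem.Chars.isdigit c then c else ' '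

-- maximal digit runs of cs, scanned with current token tok (the common tokenization)
def pcToks : List Char → List Char → List (List Char)
  | [], tok => if tok.isEmpty then [] else [tok]
  | c :: r, tok =>
      if PySem.Chars.isdigit c then pcToks r (tok ++ [c])
      else if tok.isEmpty then pcToks r []
      else tok :: pcToks r []

-- the value A assigns to a token
def pcVal (t : List Char) : Int := (PySem.Int.ofChars? t).getD 0 - 1

-- the flush processing of B, lifted to a list of already-parsed values
def pcProc (n : Int) : List Int → PySem.Set Int × List Int → PySem.Set Int × List Int
  | [], SL => SL
  | v :: r, SL =>
      pcProc n r (if SL.1.contains v then SL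
                  else (SL.1.add v, if 0 ≤ v ∧ v < n then SL.2 ++ [v] else SL.2))

lemma isspace_of_isdigit (c : Char) (h : PySem.Chars.isdigit c = true) :
    PySem.Chars.isspace c = false := by
  unfold PySem.Chars.isdigit at h
  unfold PySem.Chars.isspace
  simp only [Bool.and_eq_true, decide_eq_true_eq] at h
  have h1 : 48 ≤ c.toNat := Fin.mk_le_mk.mp h.1
  have h2 : c.toNat ≤ 57 := Fin.mk_le_mk.mp h.2
  simp only [Bool.or_eq_false_iff, Bool.and_eq_false_iff, decide_eq_false_iff_not]
  omega

lemma go_nil (cur : List Char) (acc : List (List Char)) :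
    PySem.Chars.split₀.go [] cur acc
      = if cur.isEmpty then acc.reverse else (cur.reverse :: acc).reverse := by
  simp [PySem.Chars.split₀.go]

lemma go_cons_space (c : Char) (r cur : List Char) (acc : List (List Char))
    (h : PySem.Chars.isspace c = true) :
    PySem.Chars.split₀.go (c :: r) cur acc
      = if cur.isEmpty then PySem.Chars.split₀.go r [] acc
        else PySem.Chars.split₀.go r [] (cur.reverse :: acc) := by
  rw [PySem.Chars.split₀.go]; simp [h]

lemma go_cons_nonspace (c : Char) (r cur : List Char) (acc : List (List Char))
    (h : PySem.Chars.isspace c = false) :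
    PySem.Chars.split₀.go (c :: r) cur acc = PySem.Chars.split₀.go r (c :: cur) acc := by
  rw [PySem.Chars.split₀.go]; simp [h]

-- leading whitespace is ignored by split₀.go (with empty current token)
lemma go_dropWhile (s : List Char) (acc : List (List Char)) :
    PySem.Chars.split₀.go (List.dropWhile PySem.Chars.isspace s) [] acc
      = PySem.Chars.split₀.go s [] acc := by
  induction s generalizing acc with
  | nil => rfl
  | cons c r ih =>
    by_cases h : PySem.Chars.isspace c = true
    · rw [List.dropWhile_cons_of_pos (by simpa using h), go_cons_space c r [] acc h]
      simpa using ih acc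
    · rw [List.dropWhile_cons_of_neg (by simpa using h)]

-- trailing whitespace is ignored by split₀.go
lemma go_append_spaces (t : List Char) (ht : ∀ c ∈ t, PySem.Chars.isspace c = true)
    (s cur : List Char) (acc : List (List Char)) :
    PySem.Chars.split₀.go (s ++ t) cur acc = PySem.Chars.split₀.go s cur acc := by
  induction s generalizing cur acc with
  | nil =>
    simp only [List.nil_append]
    rw [go_nil]
    induction t generalizing cur acc with
    | nil => rw [go_nil]
    | cons c r ih =>
      rw [go_cons_space c r cur acc (ht c (by simp))]
      by_cases hc : cur.isEmpty = true
      · rw [if_pos hc, if_pos hc]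
        simpa using ih (fun d hd => ht d (by simp [hd])) [] acc
      · rw [if_neg hc, if_neg hc]
        have := ih (fun d hd => ht d (by simp [hd])) [] (cur.reverse :: acc)
        simpa using this
  | cons c r ih =>
    by_cases h : PySem.Chars.isspace c = true
    · rw [List.cons_append, go_cons_space c (r ++ t) cur acc h, go_cons_space c r cur acc h]
      by_cases hc : cur.isEmpty <;> simp [hc, ih]
    · rw [List.cons_append, go_cons_nonspace c (r ++ t) cur acc (by simpa using h),
        go_cons_nonspace c r cur acc (by simpa using h)]
      exact ih (c :: cur) acc

-- split() ignores the strip()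
lemma split₀_strip (s : List Char) :
    PySem.Chars.split₀ (PySem.Chars.strip s) = PySem.Chars.split₀ s := by
  unfold PySem.Chars.split₀ PySem.Chars.strip PySem.Chars.rstrip PySem.Chars.lstrip
  have key : ∀ u : List Char,
      PySem.Chars.split₀.go ((List.dropWhile PySem.Chars.isspace u.reverse).reverse) [] []
        = PySem.Chars.split₀.go u [] [] := by
    intro u
    conv_rhs => rw [← List.reverse_reverse u,
      ← List.takeWhile_append_dropWhile (p := PySem.Chars.isspace) (l := u.reverse),
      List.reverse_append]
    exact (go_append_spaces _ (fun c hc =>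
      List.mem_takeWhile_imp (List.mem_reverse.mp hc)) _ _ _).symm
  rw [key, go_dropWhile]

-- the split of the digit-masked string is exactly the digit-run tokenization
lemma split₀_mask (cs tok : List Char) (acc : List (List Char)) :
    PySem.Chars.split₀.go (cs.map pcSub) tok.reverse acc
      = acc.reverse ++ pcToks cs tok := by
  induction cs generalizing tok acc with
  | nil =>
    simp only [List.map_nil]
    rw [go_nil, pcToks]
    by_cases h : tok.isEmpty <;> simp_all
  | cons c r ih =>
    by_cases hd : PySem.Chars.isdigit c = true
    · have hsub : pcSub c = c := by unfold pcSub; rw [if_pos hd]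
      have hns : PySem.Chars.isspace c = false := isspace_of_isdigit c hd
      rw [List.map_cons, hsub, go_cons_nonspace _ _ _ _ hns,
        show (c :: tok.reverse) = (tok ++ [c]).reverse by simp,
        ih (tok ++ [c]) acc, pcToks, if_pos hd]
    · have hsp : PySem.Chars.isspace (pcSub c) = true := by
        unfold pcSub; rw [if_neg (by simpa using hd)]; decide
      rw [List.map_cons, go_cons_space _ _ _ _ hsp, pcToks]
      by_cases he : tok.isEmpty = true
      · have htok : tok = [] := by simpa using he
        subst htok
        rw [if_pos (by simp : ([] : List Char).reverse.isEmpty = true)]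
        simpa [hd] using ih [] acc
      · rw [if_neg (by simpa using he), if_neg hd, if_neg he, List.reverse_reverse]
        have := ih [] (tok :: acc)
        simp only [List.reverse_nil] at this
        rw [this]
        simp

-- B's fold over "completion + '\n'" flushes exactly the tokenization's values
lemma foldB (n : Int) (cs tok : List Char) (S : PySem.Set Int) (L : List Int) :
    (cs ++ ['\n']).foldl (pcStep n) (tok, S, L)
      = ([], pcProc n ((pcToks cs tok).map pcVal) (S, L)) := by
  induction cs generalizing tok S L with
  | nil =>
    simp only [List.nil_append, List.foldl_cons, List.foldl_nil, pcToks]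
    have hnd : PySem.Chars.isdigit '\n' = false := by decide
    by_cases he : tok.isEmpty
    · have : tok = [] := by simpa using he
      subst this
      simp [pcStep, hnd, pcProc]
    · simp only [if_neg he, List.map_cons, List.map_nil]
      unfold pcStep
      rw [if_neg (by simp [hnd]), if_neg he]
      simp only [pcProc, pcVal, PySem.Int.ofStr?, String.toList_ofList]
  | cons c r ih =>
    simp only [List.cons_append, List.foldl_cons]
    by_cases hd : PySem.Chars.isdigit c = true
    · rw [show pcStep n (tok, S, L) c = (tok ++ [c], S, L) by unfold pcStep; rw [if_pos hd]]
      rw [ih (tok ++ [c]) S L, pcToks, if_pos hd]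
    · by_cases he : tok.isEmpty
      · have : tok = [] := by simpa using he
        subst this
        rw [show pcStep n ([], S, L) c = ([], S, L) by unfold pcStep; rw [if_neg hd]; simp]
        rw [ih [] S L, pcToks, if_neg hd, if_pos (by simp)]
      · rw [show pcStep n (tok, S, L) c
            = ([], if S.contains (pcVal tok) then (S, L)
                   else (S.add (pcVal tok),
                         if 0 ≤ pcVal tok ∧ pcVal tok < n then L ++ [pcVal tok] else L)) by
          unfold pcStep pcVal PySem.Int.ofStr?
          rw [if_neg hd, if_neg he]
          simp]
        rw [ih [] _ _, pcToks, if_neg hd, if_neg he]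
        simp only [List.map_cons, pcProc]

-- the seen-set component of pcProc is a plain Set.update
lemma update_cons (S : PySem.Set Int) (v : Int) (r : List Int) :
    PySem.Set.update S (v :: r) = PySem.Set.update (PySem.Set.add S v) r := rfl

lemma add_of_contains (S : PySem.Set Int) (v : Int) (hc : S.contains v = true) :
    PySem.Set.add S v = S := by unfold PySem.Set.add; rw [if_pos hc]

lemma add_of_not_contains (S : PySem.Set Int) (v : Int) (hc : ¬ S.contains v = true) :
    PySem.Set.add S v = S ++ [v] := by unfold PySem.Set.add; rw [if_neg hc]

lemma pcProc_fst (n : Int) (vs : List Int) (S : PySem.Set Int) (L : List Int) :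
    (pcProc n vs (S, L)).1 = PySem.Set.update S vs := by
  induction vs generalizing S L with
  | nil => simp [pcProc, PySem.Set.update]
  | cons v r ih =>
    rw [pcProc, update_cons]
    by_cases hc : S.contains v = true
    · rw [if_pos hc, add_of_contains S v hc]
      exact ih S L
    · rw [if_neg hc, add_of_not_contains S v hc]
      exact ih (S ++ [v]) _

-- Set.update only appends
lemma update_append (S : PySem.Set Int) (vs : List Int) :
    ∃ t, PySem.Set.update S vs = S ++ t := by
  induction vs generalizing S with
  | nil => exact ⟨[], by simp [PySem.Set.update]⟩
  | cons v r ih =>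
    rw [update_cons]
    by_cases hc : S.contains v = true
    · rw [add_of_contains S v hc]
      exact ih S
    · rw [add_of_not_contains S v hc]
      obtain ⟨t, ht⟩ := ih (S ++ [v])
      exact ⟨[v] ++ t, by rw [ht, List.append_assoc]⟩

-- the ordering component of pcProc: the in-range filter of the newly added elements
lemma pcProc_snd (n : Int) (vs : List Int) (S : PySem.Set Int) (L : List Int) :
    (pcProc n vs (S, L)).2
      = L ++ ((PySem.Set.update S vs).drop S.length).filter
          (fun v => decide (0 ≤ v ∧ v < n)) := by
  induction vs generalizing S L with
  | nil => simp [pcProc, PySem.Set.update]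
  | cons v r ih =>
    rw [pcProc, update_cons]
    by_cases hc : S.contains v = true
    · rw [if_pos hc, add_of_contains S v hc]
      exact ih S L
    · rw [if_neg hc, add_of_not_contains S v hc]
      show (pcProc n r (S ++ [v], if 0 ≤ v ∧ v < n then L ++ [v] else L)).2
          = L ++ ((PySem.Set.update (S ++ [v]) r).drop S.length).filter
              (fun v => decide (0 ≤ v ∧ v < n))
      rw [ih (S ++ [v]) _]
      obtain ⟨t, ht⟩ := update_append (S ++ [v]) r
      rw [ht]
      have h1 : ((S ++ [v]) ++ t).drop S.length = v :: t := by
        rw [List.append_assoc]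
        rw [show List.drop S.length (S ++ ([v] ++ t)) = [v] ++ t from List.drop_left]
        rfl
      have h2 : ((S ++ [v]) ++ t).drop (S ++ [v]).length = t := List.drop_left
      rw [h1, h2, List.filter_cons]
      by_cases hr : 0 ≤ v ∧ v < n
      · rw [if_pos hr, if_pos (by simpa using hr)]
        simp
      · rw [if_neg hr, if_neg (by simpa using hr)]

-- range membership as an arithmetic test
lemma range_contains (n i : Int) :
    (PySem.List.pyRange 0 n 1).contains i = decide (0 ≤ i ∧ i < n) := by
  rw [List.contains_eq_mem]
  by_cases h : 0 ≤ i ∧ i < n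
  · simp [PySem.List.mem_pyRange_one, h]
  · simp only [decide_eq_false h, decide_eq_false_iff_not]
    rw [PySem.List.mem_pyRange_one]
    omega

-- A's parsed index list, written through the tokenization
lemma indices_eq (completion : String) :
    (PySem.Str.split₀ (PySem.Str.strip
        (String.ofList (completion.toList.map (fun c => if PySem.Chars.isdigit c then c else ' '))))).map
          (fun t => (PySem.Int.ofStr? t).getD 0 - 1)
      = (pcToks completion.toList []).map pcVal := by
  have h1 : (PySem.Str.strip (String.ofList
      (completion.toList.map (fun c => if PySem.Chars.isdigit c then c else ' ')))).toList
      = PySem.Chars.strip (completion.toList.map pcSub) := by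
    rw [PySem.Str.toList_strip]
    congr 1
    simp [pcSub]
  unfold PySem.Str.split₀
  rw [h1, split₀_strip]
  have h2 : PySem.Chars.split₀ (completion.toList.map pcSub)
      = pcToks completion.toList [] := by
    have := split₀_mask completion.toList [] []
    simpa [PySem.Chars.split₀] using this
  rw [h2, List.map_map]
  apply List.map_congr_left
  intro t _
  simp [pcVal, PySem.Int.ofStr?]

-- ===== VERDICT (by name: the statement is the Claim_ definition above) =====
theorem parse_completion_py_spec : Claim_equal_parse_completion_py := by
  intro completion num_passages _
  unfold Spec_parse_completion_py
  show parse_completion_py completion num_passages = _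
  simp only [parse_completion_py, parse_completion_py_alt]
  rw [foldB num_passages completion.toList [] PySem.Set.empty []]
  rw [indices_eq completion]
  set ivals := (pcToks completion.toList []).map pcVal with hiv
  rw [pcProc_fst, pcProc_snd]
  have hupd : PySem.Set.update PySem.Set.empty ivals = PySem.Set.ofList ivals :=
    PySem.Set.update_nil_left ivals
  rw [hupd, PySem.List.dedup_eq_ofList]
  congr 1
  · rw [show (PySem.Set.empty : PySem.Set Int).length = 0 from rfl, List.drop_zero,
      List.nil_append]
    apply List.filter_congr
    intro i _
    rw [range_contains]
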